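-- pv_equiv track=rewrite | github.com/davidrocha03/ayed1-2025-tps | TP4-CADENA-DE-CARACTERES/ejercicio-10.py | reemplazar_palabras
-- ===== SOURCE A (Python) =====
-- def reemplazar_palabras(cadena: str, v: str, n: str):
--     """
--     Pre: 'cadena' es una cadena; 'v' y 'n' son cadenas a comparar y reemplazar.
--     Post: devuelve una tupla (cadena_modificada, cantidad_reemplazos).
--     """
--     palabras = cadena.split()
--     contador = 0
--     nueva = []
--     for palabra in palabras:
--         if palabra == v:
--             palabra = n
--             contador += 1
--         nueva.append(palabra)
--     return ' '.join(nueva), contador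
-- ===== SOURCE B (Python) =====
-- def reemplazar_palabras(cadena: str, v: str, n: str):
--     """Divide and conquer: split the word list in half, solve each half
--     recursively, and merge (concatenate with a space, add the counts)."""
--     def rec(ws):
--         if not ws:
--             return "", 0
--         if len(ws) == 1:
--             return (n, 1) if ws[0] == v else (ws[0], 0)
--         mid = len(ws) // 2
--         ls, lc = rec(ws[:mid])
--         rs, rc = rec(ws[mid:])
--         return ls + " " + rs, lc + rc
--     return rec(cadena.split())
-- ===== Notes on version B (the rewrite author's own statement) =====
-- stated objective: alternative
-- what changed: Replaces A's single fused loop (counter plus output list, then a final ' '.join) by a divide-and-conquer recursion that splits the word list in half, solves each half, and merges the half-strings with a space while adding the half-counts.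
import Mathlib
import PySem

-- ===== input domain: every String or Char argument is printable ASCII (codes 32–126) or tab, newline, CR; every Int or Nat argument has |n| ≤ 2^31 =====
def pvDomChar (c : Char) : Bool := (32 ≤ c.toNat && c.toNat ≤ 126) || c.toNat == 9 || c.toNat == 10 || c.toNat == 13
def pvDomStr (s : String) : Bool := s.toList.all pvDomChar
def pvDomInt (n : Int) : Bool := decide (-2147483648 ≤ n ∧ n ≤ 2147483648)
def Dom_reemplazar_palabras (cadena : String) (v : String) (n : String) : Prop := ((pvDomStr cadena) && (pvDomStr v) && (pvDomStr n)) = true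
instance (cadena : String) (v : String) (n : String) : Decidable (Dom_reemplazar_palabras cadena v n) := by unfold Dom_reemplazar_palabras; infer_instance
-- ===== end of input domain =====

-- B replaces A's single fused loop (counter + output list, then join) by divide and conquer
-- on the word list, merging half-results with a space and adding counts; objective: alternative.

-- ===== PORT A =====
def reemplazar_palabras (cadena : String) (v : String) (n : String) : String × Int :=
  let palabras := PySem.Str.split₀ cadena
  let st := palabras.foldl
    (fun (st : Int × List String) palabra =>
      if palabra == v then (st.1 + 1, st.2 ++ [n]) else (st.1, st.2 ++ [palabra]))
    (0, [])
  (PySem.Str.join " " st.2, st.1)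

-- ===== PORT B =====
-- Python's `ls + " " + rs` on str is exact concatenation of code points:
-- ported as String.ofList of the concatenated character lists.
def pvDC (v : String) (n : String) (ws : List String) : String × Int :=
  match ws with
  | [] => ("", 0)
  | [w] => if w == v then (n, 1) else (w, 0)
  | w1 :: w2 :: rest =>
    let mid := (w1 :: w2 :: rest).length / 2
    let L := pvDC v n ((w1 :: w2 :: rest).take mid)
    let R := pvDC v n ((w1 :: w2 :: rest).drop mid)
    (String.ofList (L.1.toList ++ ' ' :: R.1.toList), L.2 + R.2)
termination_by ws.length
decreasing_by
  · simp [List.length_take]; omega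
  · simp; omega

def reemplazar_palabras_alt (cadena : String) (v : String) (n : String) : String × Int :=
  pvDC v n (PySem.Str.split₀ cadena)

-- ===== PRECONDITION & SPEC =====
def Spec_reemplazar_palabras (cadena : String) (v : String) (n : String) (out : String × Int) : Prop := out = reemplazar_palabras_alt cadena v n
instance (cadena : String) (v : String) (n : String) (out : String × Int) : Decidable (Spec_reemplazar_palabras cadena v n out) := by unfold Spec_reemplazar_palabras; infer_instance

-- ===== CLAIM (what is proved, stated in full; the proofs are below) =====
def Claim_equal_reemplazar_palabras : Prop := ∀ (cadena : String) (v : String) (n : String), Dom_reemplazar_palabras cadena v n → Spec_reemplazar_palabras cadena v n (reemplazar_palabras cadena v n)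

-- ===== LEMMAS AND PROOFS =====

-- A's fused loop equals (count, map) for any starting accumulator.
lemma fused_loop_eq (v n : String) (ps : List String) (c : Int) (acc : List String) :
    ps.foldl
      (fun (st : Int × List String) palabra =>
        if palabra == v then (st.1 + 1, st.2 ++ [n]) else (st.1, st.2 ++ [palabra]))
      (c, acc)
    = (c + (ps.count v : Int), acc ++ ps.map (fun w => if w == v then n else w)) := by
  induction ps generalizing c acc with
  | nil => simp
  | cons p ps ih =>
    rw [List.foldl_cons]
    by_cases h : p = v
    · rw [if_pos (by simp [h]), ih]
      simp [h]
      ring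
    · rw [if_neg (by simp [h]), ih]
      simp [h]

-- join over a concatenation of two nonempty lists of parts splits at the seam.
lemma join_append_ne (sep : List Char) (xs ys : List (List Char)) (hx : xs ≠ []) (hy : ys ≠ []) :
    PySem.Chars.join sep (xs ++ ys)
      = PySem.Chars.join sep xs ++ sep ++ PySem.Chars.join sep ys := by
  induction xs with
  | nil => exact absurd rfl hx
  | cons x xs ih =>
    cases xs with
    | nil =>
      cases ys with
      | nil => exact absurd rfl hy
      | cons y ys' => simp [PySem.Chars.join_singleton, PySem.Chars.join_cons_cons]
    | cons x2 xs' =>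
      have := ih (by simp) 
      simp only [List.cons_append, PySem.Chars.join_cons_cons] at *
      rw [this]
      simp

-- B's divide and conquer equals (join " " of the mapped words, count):
-- strong induction on a length bound.
lemma pvDC_eq_aux (v n : String) : ∀ (N : Nat) (ps : List String), ps.length ≤ N →
    pvDC v n ps
      = (PySem.Str.join " " (ps.map (fun w => if w == v then n else w)), (ps.count v : Int)) := by
  intro N
  induction N with
  | zero =>
    intro ps hle
    have hps : ps = [] := List.eq_nil_of_length_eq_zero (Nat.le_zero.mp hle)
    subst hps
    simp [pvDC, PySem.Str.join, PySem.Chars.join_nil]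
  | succ N ih =>
    intro ps hle
    cases ps with
    | nil => simp [pvDC, PySem.Str.join, PySem.Chars.join_nil]
    | cons w ws =>
      cases ws with
      | nil =>
        by_cases h : w = v <;>
          simp [pvDC, h, PySem.Str.join, PySem.Chars.join_singleton, String.ofList_toList]
      | cons w2 rest =>
        have hmid1 : 1 ≤ (w :: w2 :: rest).length / 2 := by simp; omega
        have hmid2 : (w :: w2 :: rest).length / 2 < (w :: w2 :: rest).length := by simp; omega
        have hlen : (w :: w2 :: rest).length ≤ N + 1 := hle
        rw [pvDC]
        rw [ih _ (by rw [List.length_take]; omega), ih _ (by rw [List.length_drop]; omega),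
          Prod.mk.injEq]
        have htd : (w :: w2 :: rest).take ((w :: w2 :: rest).length / 2)
            ++ (w :: w2 :: rest).drop ((w :: w2 :: rest).length / 2) = w :: w2 :: rest :=
          List.take_append_drop _ _
        constructor
        · apply String.toList_injective
          rw [PySem.Str.toList_join, PySem.Str.toList_join, PySem.Str.toList_join]
          have hj := join_append_ne " ".toList
            ((((w :: w2 :: rest).take ((w :: w2 :: rest).length / 2)).map
                (fun w => if w == v then n else w)).map String.toList)
            ((((w :: w2 :: rest).drop ((w :: w2 :: rest).length / 2)).map
                (fun w => if w == v then n else w)).map String.toList)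
            (by simp) (by simp [List.drop_eq_nil_iff]; omega)
          rw [← List.map_append, ← List.map_append, htd] at hj
          rw [hj]
          simp
        · conv_rhs => rw [← htd]
          rw [List.count_append]
          push_cast
          ring

lemma pvDC_eq (v n : String) (ps : List String) :
    pvDC v n ps
      = (PySem.Str.join " " (ps.map (fun w => if w == v then n else w)), (ps.count v : Int)) :=
  pvDC_eq_aux v n ps.length ps le_rfl

-- ===== VERDICT (by name: the statement is the Claim_ definition above) =====
theorem reemplazar_palabras_spec : Claim_equal_reemplazar_palabras := by
  intro cadena v n _
  show reemplazar_palabras cadena v n = reemplazar_palabras_alt cadena v n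
  unfold reemplazar_palabras reemplazar_palabras_alt
  simp only []
  rw [pvDC_eq, fused_loop_eq]
  simp
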